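-- pv_equiv track=rewrite | github.com/SoyamDarshan/nlp_to_elasticsearch | python-service/api.py | detect_intent_from_response
-- ===== SOURCE A (Python) =====
-- def schema_template_a(hit):
--     # Component/Package: type == 'component' (strict)
--     src = hit.get('_source', {})
--     return src.get('type', '').lower() == 'component'
--
-- def schema_template_b(hit):
--     # CVE: type == 'cve' (strict)
--     src = hit.get('_source', {})
--     return src.get('type', '').lower() == 'cve'
--
-- def detect_intent_from_response(hits):
--     if not hits:
--         return 'package'
--     all_b = all(schema_template_b(hit) for hit in hits)
--     if all_b:
--         return 'cve'
--     all_a = all(schema_template_a(hit) for hit in hits)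
--     if all_a:
--         return 'package'
--     return 'mixed'
-- ===== SOURCE B (Python) =====
-- def _hit_intent(hit):
--     # Intent a single hit would produce on its own.
--     t = hit.get('_source', {}).get('type', '').lower()
--     if t == 'cve':
--         return 'cve'
--     if t == 'component':
--         return 'package'
--     return 'mixed'
--
-- def detect_intent_from_response(hits):
--     # Classify each hit independently, then merge: a uniform non-mixed label
--     # wins, anything else is 'mixed'. Empty response defaults to 'package'.
--     if not hits:
--         return 'package'
--     result = _hit_intent(hits[0])
--     if result == 'mixed':
--         return 'mixed'
--     for hit in hits[1:]:
--         if _hit_intent(hit) != result: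
--             return 'mixed'
--     return result
-- ===== Notes on version B (the rewrite author's own statement) =====
-- stated objective: alternative
-- what changed: Instead of A's two global all() scans over the whole hit list (one per schema predicate), B classifies each hit independently into its own intent label ('cve'/'package'/'mixed') and folds once over the list with an early exit, returning the first hit's label if all labels agree and 'mixed' otherwise.
import Mathlib
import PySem

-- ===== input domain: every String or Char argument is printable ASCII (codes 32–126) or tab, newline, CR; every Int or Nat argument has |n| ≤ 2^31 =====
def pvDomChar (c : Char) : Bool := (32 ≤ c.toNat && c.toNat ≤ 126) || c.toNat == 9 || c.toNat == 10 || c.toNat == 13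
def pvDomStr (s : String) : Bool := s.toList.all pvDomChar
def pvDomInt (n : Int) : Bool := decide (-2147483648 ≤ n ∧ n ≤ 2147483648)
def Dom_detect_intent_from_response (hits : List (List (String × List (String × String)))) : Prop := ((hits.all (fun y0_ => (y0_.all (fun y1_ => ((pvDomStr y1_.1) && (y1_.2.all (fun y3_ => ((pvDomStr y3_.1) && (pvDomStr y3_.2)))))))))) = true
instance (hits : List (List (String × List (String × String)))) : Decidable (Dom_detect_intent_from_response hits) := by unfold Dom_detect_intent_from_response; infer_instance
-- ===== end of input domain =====

-- B: classifies each hit independently into its own intent label and folds once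
-- over the list with an early exit, instead of A's two global all() scans
-- (alternative decomposition, same cost).

-- ===== PORT A =====
def schema_template_a (hit : List (String × List (String × String))) : Bool :=
  let src := PySem.Dict.getD (PySem.Dict.mk hit) "_source" []
  PySem.Str.lower (PySem.Dict.getD (PySem.Dict.mk src) "type" "") == "component"

def schema_template_b (hit : List (String × List (String × String))) : Bool :=
  let src := PySem.Dict.getD (PySem.Dict.mk hit) "_source" []
  PySem.Str.lower (PySem.Dict.getD (PySem.Dict.mk src) "type" "") == "cve"

def detect_intent_from_response (hits : List (List (String × List (String × String)))) : String :=
  if hits.isEmpty then "package"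
  else
    let all_b := hits.all schema_template_b
    if all_b then "cve"
    else
      let all_a := hits.all schema_template_a
      if all_a then "package"
      else "mixed"

-- ===== PORT B =====
def pvHitIntent (hit : List (String × List (String × String))) : String :=
  let t := PySem.Str.lower (PySem.Dict.getD (PySem.Dict.mk (PySem.Dict.getD (PySem.Dict.mk hit) "_source" [])) "type" "")
  if t == "cve" then "cve"
  else if t == "component" then "package"
  else "mixed"

-- the for-loop over hits[1:] with its early return
def pvMergeGo (r : String) : List (List (String × List (String × String))) → String
  | [] => r
  | h :: t => if pvHitIntent h != r then "mixed" else pvMergeGo r t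

def detect_intent_from_response_alt (hits : List (List (String × List (String × String)))) : String :=
  match hits with
  | [] => "package"
  | h :: t =>
    let r := pvHitIntent h
    if r == "mixed" then "mixed"
    else pvMergeGo r t

-- ===== PRECONDITION & SPEC =====
def Spec_detect_intent_from_response (hits : List (List (String × List (String × String)))) (out : String) : Prop := out = detect_intent_from_response_alt hits
instance (hits : List (List (String × List (String × String)))) (out : String) : Decidable (Spec_detect_intent_from_response hits out) := by unfold Spec_detect_intent_from_response; infer_instance

-- ===== CLAIM (what is proved, stated in full; the proofs are below) =====
def Claim_equal_detect_intent_from_response : Prop := ∀ (hits : List (List (String × List (String × String)))), Dom_detect_intent_from_response hits → Spec_detect_intent_from_response hits (detect_intent_from_response hits)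

-- ===== LEMMAS AND PROOFS =====
-- the loop returns r iff every remaining hit's own label is r
theorem pvMergeGo_eq (r : String) (l : List (List (String × List (String × String)))) :
    pvMergeGo r l = if l.all (fun x => pvHitIntent x == r) then r else "mixed" := by
  induction l with
  | nil => rfl
  | cons h t ih =>
    simp only [pvMergeGo, List.all_cons, bne]
    by_cases hb : pvHitIntent h == r
    · simp [hb, ih]
    · simp [hb]

-- a hit's individual label is "cve" exactly on schema_template_b, "package" exactly on schema_template_a
theorem pvHitIntent_cve (x : List (String × List (String × String))) :
    (pvHitIntent x == "cve") = schema_template_b x := by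
  simp only [pvHitIntent, schema_template_b]
  set ty := PySem.Str.lower (PySem.Dict.getD (PySem.Dict.mk (PySem.Dict.getD (PySem.Dict.mk x) "_source" [])) "type" "") with hty
  by_cases hb : ty == "cve"
  · have h' : ty = "cve" := by simpa using hb
    rw [h']; decide
  · by_cases ha : ty == "component"
    · have h' : ty = "component" := by simpa using ha
      rw [h']; decide
    · simp [hb, ha]

theorem pvHitIntent_pkg (x : List (String × List (String × String))) :
    (pvHitIntent x == "package") = schema_template_a x := by
  simp only [pvHitIntent, schema_template_a]
  set ty := PySem.Str.lower (PySem.Dict.getD (PySem.Dict.mk (PySem.Dict.getD (PySem.Dict.mk x) "_source" [])) "type" "") with hty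
  by_cases hb : ty == "cve"
  · have h' : ty = "cve" := by simpa using hb
    rw [h']; decide
  · by_cases ha : ty == "component"
    · have h' : ty = "component" := by simpa using ha
      rw [h']; decide
    · simp [hb, ha]

-- ===== VERDICT (by name: the statement is the Claim_ definition above) =====
theorem detect_intent_from_response_spec : Claim_equal_detect_intent_from_response := by
  intro hits _
  unfold Spec_detect_intent_from_response
  cases hits with
  | nil => rfl
  | cons h t =>
    simp only [detect_intent_from_response, detect_intent_from_response_alt,
      List.isEmpty_cons, Bool.false_eq_true, if_false, List.all_cons, pvMergeGo_eq]
    set ty := PySem.Str.lower (PySem.Dict.getD (PySem.Dict.mk (PySem.Dict.getD (PySem.Dict.mk h) "_source" [])) "type" "") with hty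
    by_cases hb : ty == "cve"
    · have hI : pvHitIntent h = "cve" := by simp [pvHitIntent, ← hty, hb]
      have hne : ty ≠ "component" := by
        intro hc; rw [hc] at hb; simp at hb
      have hA : schema_template_a h = false := by
        simp [schema_template_a, ← hty, hne]
      have hB : schema_template_b h = true := by simp [schema_template_b, ← hty, hb]
      simp only [hI, hA, hB, show ("cve" == "mixed") = false by decide,
        Bool.false_eq_true, if_false, Bool.true_and, Bool.false_and]
      by_cases hall : t.all schema_template_b
      · simp [hall, fun x => pvHitIntent_cve x]
      · simp only [hall, Bool.false_eq_true, if_false]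
        have : t.all (fun x => pvHitIntent x == "cve") = false := by
          simpa [fun x => pvHitIntent_cve x] using hall
        simp [this]
    · by_cases ha : ty == "component"
      · have hI : pvHitIntent h = "package" := by simp [pvHitIntent, ← hty, hb, ha]
        have hA : schema_template_a h = true := by simp [schema_template_a, ← hty, ha]
        have hB : schema_template_b h = false := by simp [schema_template_b, ← hty, hb]
        simp only [hI, hA, hB, Bool.true_and, Bool.false_and, Bool.false_eq_true, if_false,
          show ("package" == "mixed") = false by decide]
        by_cases hall : t.all schema_template_a
        · simp [hall, fun x => pvHitIntent_pkg x]
        · have : t.all (fun x => pvHitIntent x == "package") = false := by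
            simpa [fun x => pvHitIntent_pkg x] using hall
          simp [hall, this]
      · have hI : pvHitIntent h = "mixed" := by simp [pvHitIntent, ← hty, hb, ha]
        have hA : schema_template_a h = false := by simp [schema_template_a, ← hty, ha]
        have hB : schema_template_b h = false := by simp [schema_template_b, ← hty, hb]
        simp [hI, hA, hB]
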